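-- pv_equiv track=rewrite | github.com/toruinaba/tascpy | src/tascpy/utils/split.py | split_list_by_integers
-- ===== SOURCE A (Python) =====
-- from typing import List, TypeVar, Callable, Any, Tuple
--
-- T = TypeVar('T')
--
-- def split_list_by_integers(data: List[T], markers: List[int]) -> List[List[T]]:
--     """
--     整数リストの値に基づいてデータリストを分割します。マーカー値が同じ要素は同じグループに振り分けられます。
--
--     Args:
--         data: 分割対象のデータリスト
--         markers: 各要素がどのグループに属するかを示す整数リスト（dataと同じ長さ）
--
--     Returns:
--         分割後のリストを要素とするリスト。各サブリストは同じマーカー値を持つ要素で構成されます。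
--         サブリストはマーカー値に基づいて昇順に並べられます。
--
--     Raises:
--         ValueError: データとマーカーの長さが一致しない場合
--
--     Examples:
--         >>> from tascpy.utils.split import split_list_by_integers
--         >>> data = ['a', 'b', 'c', 'd', 'e', 'f']
--         >>> markers = [2, 1, 2, 3, 1, 3]
--         >>> split_list_by_integers(data, markers)
--         [['b', 'e'], ['a', 'c'], ['d', 'f']]
--     """
--     if len(data) != len(markers):
--         raise ValueError("データリストとマーカーリストの長さは一致する必要があります")
--
--     # Create a dictionary to group elements by marker value
--     groups = {}
--     for item, marker in zip(data, markers):
--         if marker not in groups: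
--             groups[marker] = []
--         groups[marker].append(item)
--
--     # Return the grouped elements in order of marker values
--     return [groups[key] for key in sorted(groups.keys())]
-- ===== SOURCE B (Python) =====
-- from typing import List, TypeVar
--
-- T = TypeVar('T')
--
-- def split_list_by_integers(data: List[T], markers: List[int]) -> List[List[T]]:
--     if len(data) != len(markers):
--         raise ValueError("データリストとマーカーリストの長さは一致する必要があります")
--     # stable sort by marker only: tied items keep order, items are never compared
--     pairs = sorted(zip(markers, data), key=lambda p: p[0])
--     grouped = []  # list of (marker, items) pairs, one per run of equal markers
--     for m, x in pairs:
--         if grouped and grouped[-1][0] == m: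
--             grouped[-1][1].append(x)
--         else:
--             grouped.append((m, [x]))
--     return [items for _, items in grouped]
-- ===== Notes on version B (the rewrite author's own statement) =====
-- stated objective: alternative
-- what changed: Replaces A's dict-of-lists grouping pass plus final key sort with a stable sort of (marker, item) pairs keyed on the marker alone, followed by one run-grouping pass over the sorted pairs; no dict is built.
import Mathlib
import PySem

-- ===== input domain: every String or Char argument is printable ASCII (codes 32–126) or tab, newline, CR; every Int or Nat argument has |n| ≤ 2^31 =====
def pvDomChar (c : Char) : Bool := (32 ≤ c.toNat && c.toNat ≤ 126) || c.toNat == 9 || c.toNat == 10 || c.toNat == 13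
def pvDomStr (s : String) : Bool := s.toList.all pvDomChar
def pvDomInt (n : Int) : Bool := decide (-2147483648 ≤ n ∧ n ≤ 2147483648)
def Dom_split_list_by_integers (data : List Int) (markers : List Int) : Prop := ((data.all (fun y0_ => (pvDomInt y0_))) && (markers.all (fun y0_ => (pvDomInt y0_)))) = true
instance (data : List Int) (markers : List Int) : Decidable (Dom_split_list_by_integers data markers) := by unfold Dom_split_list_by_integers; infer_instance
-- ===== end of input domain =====

-- B replaces A's dict-grouping pass (keyed dict of lists + final key sort) by a stable sort of
-- (marker, item) pairs on the marker alone followed by one run-grouping pass — no dict at all.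

-- ===== PORT A =====
-- groups = {}; for item, marker in zip(data, markers): if marker not in groups: groups[marker] = []
-- groups[marker].append(item);  return [groups[key] for key in sorted(groups.keys())]
def split_list_by_integers (data : List Int) (markers : List Int) : List (List Int) :=
  let groups : PySem.Dict Int (List Int) :=
    (data.zip markers).foldl
      (fun g p =>
        let g' := if g.contains p.2 then g else g.insert p.2 ([] : List Int)
        g'.modify p.2 [] (fun l => l ++ [p.1]))
      PySem.Dict.empty
  (PySem.List.sorted groups.keys (fun k => k) false).map (fun k => groups.getD k [])

-- ===== PORT B =====
-- the loop body of Source B: 'if grouped and grouped[-1][0] == m: grouped[-1][1].append(x)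
-- else: grouped.append((m, [x]))'; grouped[-1] is the last element, and appending to the
-- in-place-mutated last group is ported exactly as rebuilding dropLast ++ [last with x appended]
def pvStepB (acc : List (Int × List Int)) (p : Int × Int) : List (Int × List Int) :=
  match acc.getLast? with
  | some q => if q.1 == p.1 then acc.dropLast ++ [(q.1, q.2 ++ [p.2])] else acc ++ [(p.1, [p.2])]
  | none => acc ++ [(p.1, [p.2])]

-- pairs = sorted(zip(markers, data), key=lambda p: p[0]); run-grouping loop; [items for _, items in grouped]
def split_list_by_integers_alt (data : List Int) (markers : List Int) : List (List Int) :=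
  let pairs := PySem.List.sorted (markers.zip data) (fun p => p.1) false
  let grouped := pairs.foldl pvStepB []
  grouped.map (fun q => q.2)

-- ===== PRECONDITION & SPEC =====
-- Pre_ excludes length-mismatched inputs, on which both A and B raise ValueError.
def Pre_split_list_by_integers (data : List Int) (markers : List Int) : Prop :=
  data.length = markers.length
instance (data : List Int) (markers : List Int) : Decidable (Pre_split_list_by_integers data markers) := by unfold Pre_split_list_by_integers; infer_instance
def pvWitness_split_list_by_integers : List Int × List Int := ([10, 20, 30, 40], [2, 1, 2, 1])

def Spec_split_list_by_integers (data : List Int) (markers : List Int) (out : List (List Int)) : Prop := out = split_list_by_integers_alt data markers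
instance (data : List Int) (markers : List Int) (out : List (List Int)) : Decidable (Spec_split_list_by_integers data markers out) := by unfold Spec_split_list_by_integers; infer_instance

-- ===== CLAIM (what is proved, stated in full; the proofs are below) =====
def Claim_equal_split_list_by_integers : Prop := ∀ (data : List Int) (markers : List Int), Dom_split_list_by_integers data markers → Pre_split_list_by_integers data markers → Spec_split_list_by_integers data markers (split_list_by_integers data markers)

-- ===== LEMMAS AND PROOFS =====

-- A's loop body (conditional insert of [] then append) is exactly Dict.modify with default [].
theorem step_eq_modify (g : PySem.Dict Int (List Int)) (k v : Int) :
    (if g.contains k then g else g.insert k ([] : List Int)).modify k [] (fun l => l ++ [v])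
      = g.modify k [] (fun l => l ++ [v]) := by
  by_cases h : g.contains k
  · simp [h]
  · simp only [h]
    simp [PySem.Dict.modify, PySem.Dict.getD_insert_self, PySem.Dict.insert_insert_self,
      PySem.Dict.getD_of_not_contains, h]

-- A's whole grouping fold, rewritten as the pure modify-fold over (marker, item) pairs.
theorem groups_eq (data markers : List Int) :
    (data.zip markers).foldl
      (fun (g : PySem.Dict Int (List Int)) p =>
        let g' := if g.contains p.2 then g else g.insert p.2 ([] : List Int)
        g'.modify p.2 [] (fun l => l ++ [p.1]))
      PySem.Dict.empty
    = (markers.zip data).foldl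
        (fun (g : PySem.Dict Int (List Int)) p => g.modify p.1 [] (fun l => l ++ [p.2]))
        PySem.Dict.empty := by
  rw [← List.zip_swap data markers, List.foldl_map]
  exact PySem.List.foldl_congr_mem _ _ _ _ (fun g p _ => step_eq_modify g p.2 p.1)

-- insertBy walks past a prefix it is not inserted into
theorem insertBy_append_not_before {α : Type} (before : α → α → Bool) (x : α)
    (as bs : List α) (h : ∀ a ∈ as, before x a = false) :
    PySem.List.insertBy before x (as ++ bs) = as ++ PySem.List.insertBy before x bs := by
  induction as with
  | nil => simp
  | cons a as ih =>
      simp only [List.cons_append, PySem.List.insertBy, h a (List.mem_cons_self),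
        Bool.false_eq_true, if_false]
      rw [ih (fun a ha => h a (List.mem_cons_of_mem _ ha))]

-- inserting x into a concatenation of nonempty key-homogeneous blocks over strictly
-- increasing keys lands exactly after the blocks of keys ≤ x.1
theorem insertBy_flatMap (x : Int × Int) (ks : List Int) (f : Int → List (Int × Int))
    (hs : ks.Pairwise (· < ·)) (hf : ∀ k ∈ ks, ∀ p ∈ f k, p.1 = k)
    (hne : ∀ k ∈ ks, f k ≠ []) :
    PySem.List.insertBy (fun a b => decide (a.1 < b.1)) x (ks.flatMap f)
      = (ks.filter (fun k => decide (k ≤ x.1))).flatMap f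
        ++ x :: (ks.filter (fun k => decide (x.1 < k))).flatMap f := by
  induction ks with
  | nil => simp [PySem.List.insertBy]
  | cons k ks ih =>
      simp only [List.flatMap_cons, List.filter_cons]
      by_cases hk : k ≤ x.1
      · rw [insertBy_append_not_before _ _ _ _
          (fun a ha => by simp [hf k (List.mem_cons_self) a ha]; omega)]
        rw [ih hs.of_cons (fun k' hk' => hf k' (List.mem_cons_of_mem _ hk'))
          (fun k' hk' => hne k' (List.mem_cons_of_mem _ hk'))]
        simp [hk, not_lt.mpr hk]
      · rw [not_le] at hk
        obtain ⟨p, t, hpt⟩ := List.exists_cons_of_ne_nil (hne k List.mem_cons_self)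
        have hp1 : p.1 = k := hf k List.mem_cons_self p (by rw [hpt]; exact List.mem_cons_self)
        have h1 : ks.filter (fun k' => decide (k' ≤ x.1)) = [] := by
          rw [List.filter_eq_nil_iff]
          intro k' hk'
          have := (List.pairwise_cons.mp hs).1 k' hk'
          simp; omega
        have h2 : ks.filter (fun k' => decide (x.1 < k')) = ks := by
          rw [List.filter_eq_self]
          intro k' hk'
          have := (List.pairwise_cons.mp hs).1 k' hk'
          simp; omega
        rw [hpt]
        simp only [List.cons_append, PySem.List.insertBy]
        rw [if_pos (by simp [hp1]; omega)]
        simp [h1, h2, hk, not_le.mpr hk, hpt]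

-- splitting the ≤-filter of a strictly increasing list at a
theorem filter_le_split (a : Int) (K : List Int) (hs : K.Pairwise (· < ·)) :
    K.filter (fun k => decide (k ≤ a))
      = K.filter (fun k => decide (k < a)) ++ K.filter (fun k => decide (k = a)) := by
  induction K with
  | nil => simp
  | cons k K ih =>
      have hlt := (List.pairwise_cons.mp hs).1
      have hnil : ∀ pred : Int → Bool, (∀ k' ∈ K, ¬ pred k' = true) → K.filter pred = [] :=
        fun pred h => List.filter_eq_nil_iff.mpr h
      rcases lt_trichotomy k a with h | h | h
      · simp [h, le_of_lt h, ne_of_lt h, ih hs.of_cons]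
      · subst h
        rw [List.filter_cons, List.filter_cons, List.filter_cons,
          hnil (fun k' => decide (k' ≤ k)) (fun k' hk' => by have := hlt k' hk'; simp; omega),
          hnil (fun k' => decide (k' < k)) (fun k' hk' => by have := hlt k' hk'; simp; omega),
          hnil (fun k' => decide (k' = k)) (fun k' hk' => by have := hlt k' hk'; simp; omega)]
        simp
      · have hKle : K.filter (fun k' => decide (k' ≤ a)) = [] :=
          hnil _ (fun k' hk' => by have := hlt k' hk'; simp; omega)
        have hKlt : K.filter (fun k' => decide (k' < a)) = [] :=
          hnil _ (fun k' hk' => by have := hlt k' hk'; simp; omega)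
        have hKeq : K.filter (fun k' => decide (k' = a)) = [] :=
          hnil _ (fun k' hk' => by have := hlt k' hk'; simp; omega)
        simp [List.filter_cons, not_le.mpr h, ne_of_gt h, hKle, hKlt, hKeq]
        omega

-- the sorted distinct keys of l ++ [x] are those of l with x.1 spliced in
theorem sorted_keys_append (t : List (Int × Int)) (x : Int × Int) :
    PySem.List.sorted (PySem.Set.ofList ((t ++ [x]).map (fun p => p.1))) (fun k => k) false
      = (PySem.List.sorted (PySem.Set.ofList (t.map (fun p => p.1))) (fun k => k) false).filter
          (fun k => decide (k < x.1))
        ++ x.1 :: (PySem.List.sorted (PySem.Set.ofList (t.map (fun p => p.1))) (fun k => k) false).filter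
          (fun k => decide (x.1 < k)) := by
  set K := PySem.List.sorted (PySem.Set.ofList (t.map (fun p => p.1))) (fun k => k) false with hKdef
  have hK : K.Pairwise (· < ·) := PySem.List.sorted_ofList_pairwise_lt _
  have hmemK : ∀ y, y ∈ K ↔ y ∈ t.map (fun p => p.1) := by
    intro y
    rw [hKdef, PySem.List.mem_sorted, PySem.Set.mem_ofList]
  apply PySem.List.sorted_eq_of_perm_of_pairwise_lt
  · rw [List.perm_ext_iff_of_nodup ?_ (PySem.Set.nodup_ofList _)]
    · intro y
      simp only [List.mem_append, List.mem_cons, List.mem_filter, PySem.Set.mem_ofList,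
        List.map_append, List.map_cons, List.map_nil, hmemK, decide_eq_true_eq]
      rcases lt_trichotomy y x.1 with h | h | h <;> simp [h, ne_of_lt, ne_of_gt] <;> tauto
    · refine (List.pairwise_append.mpr ⟨hK.filter _, List.pairwise_cons.mpr
        ⟨fun y hy => ?_, hK.filter _⟩, fun a ha b hb => ?_⟩).imp (fun h => ne_of_lt h)
      · exact of_decide_eq_true (List.mem_filter.mp hy).2
      · have ha' := of_decide_eq_true (List.mem_filter.mp ha).2
        rcases List.mem_cons.mp hb with rfl | hb'
        · exact ha'
        · exact lt_trans ha' (of_decide_eq_true (List.mem_filter.mp hb').2)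
  · refine List.pairwise_append.mpr ⟨hK.filter _, List.pairwise_cons.mpr
      ⟨fun y hy => ?_, hK.filter _⟩, fun a ha b hb => ?_⟩
    · exact of_decide_eq_true (List.mem_filter.mp hy).2
    · have ha' := of_decide_eq_true (List.mem_filter.mp ha).2
      rcases List.mem_cons.mp hb with rfl | hb'
      · exact ha'
      · exact lt_trans ha' (of_decide_eq_true (List.mem_filter.mp hb').2)

-- STABILITY of Python's sort by first component: the stably sorted pair list is the
-- concatenation, over the sorted distinct keys, of the key's pairs in original order.
theorem stable_sort_blocks (l : List (Int × Int)) :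
    PySem.List.sorted l (fun p => p.1) false
      = (PySem.List.sorted (PySem.Set.ofList (l.map (fun p => p.1))) (fun k => k) false).flatMap
          (fun k => l.filter (fun p => p.1 == k)) := by
  induction l using List.reverseRecOn with
  | nil => rfl
  | append_singleton t x ih =>
      set K := PySem.List.sorted (PySem.Set.ofList (t.map (fun p => p.1))) (fun k => k) false
        with hKdef
      have hK : K.Pairwise (· < ·) := PySem.List.sorted_ofList_pairwise_lt _
      have hmemK : ∀ y, y ∈ K ↔ y ∈ t.map (fun p => p.1) := by
        intro y; rw [hKdef, PySem.List.mem_sorted, PySem.Set.mem_ofList]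
      have hf : ∀ k ∈ K, ∀ p ∈ t.filter (fun p => p.1 == k), p.1 = k := by
        intro k _ p hp
        exact of_decide_eq_true (List.mem_filter.mp hp).2
      have hne : ∀ k ∈ K, t.filter (fun p => p.1 == k) ≠ [] := by
        intro k hk hnil
        obtain ⟨p, hp, hp1⟩ := List.mem_map.mp ((hmemK k).mp hk)
        exact (List.filter_eq_nil_iff.mp hnil) p hp (by simp [hp1])
      rw [PySem.List.sorted_eq_foldl_insertBy, List.foldl_append, List.foldl_cons,
        List.foldl_nil, ← PySem.List.sorted_eq_foldl_insertBy, ih,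
        insertBy_flatMap x K _ hK hf hne, sorted_keys_append, filter_le_split x.1 K hK]
      have hfilter_eq : K.filter (fun k => decide (k = x.1)) = []
          ∨ K.filter (fun k => decide (k = x.1)) = [x.1] := by
        have hnd : K.Nodup := hK.imp (fun h => ne_of_lt h)
        by_cases hx : x.1 ∈ K
        · right
          have := List.Nodup.filter (fun k => decide (k = x.1)) hnd
          have hmem : ∀ y, y ∈ K.filter (fun k => decide (k = x.1)) ↔ y = x.1 ∧ x.1 ∈ K := by
            intro y
            simp only [List.mem_filter, decide_eq_true_eq]
            constructor
            · rintro ⟨hy, rfl⟩; exact ⟨rfl, hy⟩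
            · rintro ⟨rfl, hy⟩; exact ⟨hy, rfl⟩
          rcases hcases : K.filter (fun k => decide (k = x.1)) with _ | ⟨y, ys⟩
          · exact absurd ((hmem x.1).mpr ⟨rfl, hx⟩) (by rw [hcases]; simp)
          · have hy : y = x.1 := by
              have := (hmem y).mp (by rw [hcases]; exact List.mem_cons_self)
              exact this.1
            have hys : ys = [] := by
              rcases ys with _ | ⟨z, zs⟩
              · rfl
              · exfalso
                have hz : z = x.1 := by
                  have := (hmem z).mp (by rw [hcases]; simp)
                  exact this.1
                have : (y :: z :: zs).Nodup := by rw [← hcases]; exact this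
                rw [hy, hz] at this
                simp at this
            rw [hy, hys]
        · left
          exact List.filter_eq_nil_iff.mpr (fun k hk => by simp; rintro rfl; exact hx hk)
      -- the block of key x.1 in the old list, possibly empty
      have hblockx : (K.filter (fun k => decide (k = x.1))).flatMap
          (fun k => t.filter (fun p => p.1 == k)) = t.filter (fun p => p.1 == x.1) := by
        rcases hfilter_eq with h | h
        · rw [h, List.flatMap_nil]
          rcases hcases : t.filter (fun p => p.1 == x.1) with _ | ⟨p, ps⟩
          · exact hcases.symm
          · exfalso
            have hp : p ∈ t.filter (fun p => p.1 == x.1) := by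
              rw [hcases]; exact List.mem_cons_self
            have hp' := List.mem_filter.mp hp
            have hxK : x.1 ∈ K := (hmemK x.1).mpr
              (List.mem_map.mpr ⟨p, hp'.1, of_decide_eq_true hp'.2⟩)
            have hx1mem : x.1 ∈ K.filter (fun k => decide (k = x.1)) :=
              List.mem_filter.mpr ⟨hxK, by simp⟩
            rw [h] at hx1mem
            simp at hx1mem
        · rw [h]
          simp
      have hcongr : ∀ (S : List Int) (hS : ∀ k ∈ S, ¬ k = x.1),
          S.flatMap (fun k => (t ++ [x]).filter (fun p => p.1 == k))
            = S.flatMap (fun k => t.filter (fun p => p.1 == k)) := by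
        intro S hS
        induction S with
        | nil => rfl
        | cons s S ihS =>
            rw [List.flatMap_cons, List.flatMap_cons,
              ihS (fun k hk => hS k (List.mem_cons_of_mem _ hk))]
            congr 1
            rw [List.filter_append]
            have : [x].filter (fun p => p.1 == s) = [] := by
              simp
              exact fun h => (hS s List.mem_cons_self) h.symm
            rw [this, List.append_nil]
      have hfx : (t ++ [x]).filter (fun p => p.1 == x.1)
          = t.filter (fun p => p.1 == x.1) ++ [x] := by
        rw [List.filter_append]
        simp
      rw [List.flatMap_append, List.flatMap_append, List.flatMap_cons, ← hKdef,
        hcongr _ (fun k hk => ne_of_lt (of_decide_eq_true (List.mem_filter.mp hk).2)),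
        hcongr _ (fun k hk => ne_of_gt (of_decide_eq_true (List.mem_filter.mp hk).2)),
        hblockx, hfx]
      simp [List.append_assoc]

-- run-grouping a key-homogeneous block extends the open last group
theorem foldl_block (bs : List (Int × Int)) (k : Int) :
    ∀ (g : List Int) (acc : List (Int × List Int)), (∀ p ∈ bs, p.1 = k) →
    bs.foldl pvStepB (acc ++ [(k, g)]) = acc ++ [(k, g ++ bs.map (fun p => p.2))] := by
  induction bs with
  | nil => simp
  | cons p bs ih =>
      intro g acc hbs
      rw [List.foldl_cons]
      have hstep : pvStepB (acc ++ [(k, g)]) p = acc ++ [(k, g ++ [p.2])] := by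
        unfold pvStepB
        rw [List.getLast?_concat]
        simp [hbs p List.mem_cons_self]
      rw [hstep, ih (g ++ [p.2]) acc (fun q hq => hbs q (List.mem_cons_of_mem _ hq))]
      simp

-- run-grouping a concatenation of nonempty key-homogeneous blocks with strictly
-- increasing keys appends one group per key
theorem foldl_blocks (K : List Int) (f : Int → List (Int × Int)) :
    ∀ (acc : List (Int × List Int)), K.Pairwise (· < ·) →
    (∀ k ∈ K, ∀ p ∈ f k, p.1 = k) → (∀ k ∈ K, f k ≠ []) →
    (∀ q, acc.getLast? = some q → ∀ k ∈ K, q.1 ≠ k) →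
    (K.flatMap f).foldl pvStepB acc
      = acc ++ K.map (fun k => (k, (f k).map (fun p => p.2))) := by
  induction K with
  | nil => simp
  | cons k K ih =>
      intro acc hs hf hne hlast
      obtain ⟨p, bs, hpbs⟩ := List.exists_cons_of_ne_nil (hne k List.mem_cons_self)
      have hp1 : p.1 = k := hf k List.mem_cons_self p (by rw [hpbs]; exact List.mem_cons_self)
      rw [List.flatMap_cons, List.foldl_append, hpbs, List.foldl_cons]
      have hstep : pvStepB acc p = acc ++ [(k, [p.2])] := by
        unfold pvStepB
        rcases hacc : acc.getLast? with _ | q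
        · dsimp only
          rw [hp1]
        · dsimp only
          rw [if_neg (by rw [hp1]; simp only [beq_iff_eq]
                         exact hlast q hacc k List.mem_cons_self), hp1]
      rw [hstep, foldl_block bs k [p.2] acc
        (fun q hq => hf k List.mem_cons_self q (by rw [hpbs]; exact List.mem_cons_of_mem _ hq))]
      rw [ih (acc ++ [(k, [p.2] ++ bs.map (fun p => p.2))]) hs.of_cons
        (fun k' hk' => hf k' (List.mem_cons_of_mem _ hk'))
        (fun k' hk' => hne k' (List.mem_cons_of_mem _ hk'))
        (fun q hq k' hk' => by
          rw [List.getLast?_concat] at hq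
          cases hq
          exact ne_of_lt ((List.pairwise_cons.mp hs).1 k' hk'))]
      simp [hpbs]

theorem split_list_by_integers_spec : Claim_equal_split_list_by_integers := by
  intro data markers _ hlen
  unfold Spec_split_list_by_integers split_list_by_integers split_list_by_integers_alt
  dsimp only
  rw [groups_eq]
  have hmapfst : (markers.zip data).map (fun p => p.1) = markers :=
    List.map_fst_zip (le_of_eq hlen.symm)
  set l := markers.zip data with hldef
  set K := PySem.List.sorted (PySem.Set.ofList markers) (fun k => k) false with hKdef
  have hK : K.Pairwise (· < ·) := PySem.List.sorted_ofList_pairwise_lt _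
  have hmemK : ∀ y, y ∈ K ↔ y ∈ markers := by
    intro y; rw [hKdef, PySem.List.mem_sorted, PySem.Set.mem_ofList]
  -- A side: keys and per-key contents of the dict
  have hkeys : (l.foldl (fun (g : PySem.Dict Int (List Int)) p =>
      g.modify p.1 [] (fun v => v ++ [p.2])) PySem.Dict.empty).keys
      = PySem.Set.ofList markers := by
    rw [PySem.Dict.keys_foldl_modify_key]
    rw [hmapfst]
    simp [PySem.Set.update, PySem.Set.ofList]
  have hval : ∀ k : Int, (l.foldl (fun (g : PySem.Dict Int (List Int)) p =>
      g.modify p.1 [] (fun v => v ++ [p.2])) PySem.Dict.empty).getD k []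
      = (l.filter (fun p => p.1 == k)).map (fun p => p.2) := by
    intro k
    rw [PySem.Dict.getD_foldl_modify_append]
    simp [PySem.Dict.getD_empty]
  -- B side: stable sort + run grouping
  have hf : ∀ k ∈ K, ∀ p ∈ l.filter (fun p => p.1 == k), p.1 = k := by
    intro k _ p hp
    exact of_decide_eq_true (List.mem_filter.mp hp).2
  have hne : ∀ k ∈ K, l.filter (fun p => p.1 == k) ≠ [] := by
    intro k hk hnil
    obtain ⟨p, hp, hp1⟩ := List.mem_map.mp (hmapfst ▸ (hmemK k).mp hk)
    exact (List.filter_eq_nil_iff.mp hnil) p hp (by simp [hp1])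
  have hB : PySem.List.sorted l (fun p => p.1) false
      = K.flatMap (fun k => l.filter (fun p => p.1 == k)) := by
    rw [stable_sort_blocks, hmapfst]
  rw [hB, foldl_blocks K _ [] hK hf hne (fun q hq => by simp at hq), List.nil_append,
    List.map_map, hkeys]
  rw [List.map_congr_left (fun k _ => hval k)]
  rfl
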